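-- pv_equiv track=rewrite | github.com/jungt72/sealAI | backend/app/services/langgraph/graph/consult/utils.py | _friendly_from_keys
-- ===== SOURCE A (Python) =====
-- from typing import Any, Dict, Iterable, List, Optional
--
-- def _friendly_from_keys(keys: List[str], labels: Dict[str, str], order: List[str]) -> List[str]:
--     if not keys:
--         return []
--     seen = set()
--     friendly: List[str] = []
--     for key in order:
--         if key in keys and key not in seen:
--             friendly.append(labels.get(key, key))
--             seen.add(key)
--     for key in keys:
--         if key not in seen:
--             friendly.append(labels.get(key, key))
--             seen.add(key)
--     return friendly
-- ===== SOURCE B (Python) =====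
-- def _friendly_from_keys(keys, labels, order):
--     pos = {}
--     for i, k in enumerate(order):
--         pos.setdefault(k, i)
--     n = len(order)
--     distinct = list(dict.fromkeys(keys))
--     distinct.sort(key=lambda k: pos.get(k, n))
--     return [labels.get(k, k) for k in distinct]
-- ===== Notes on version B (the rewrite author's own statement) =====
-- stated objective: faster
-- what changed: Replaces A's two membership-scanning loops with an index table (first position of each order key), a dedup of keys, and ONE stable sort of the distinct keys by pos.get(k, len(order)), then a single label-mapping pass.
import Mathlib
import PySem

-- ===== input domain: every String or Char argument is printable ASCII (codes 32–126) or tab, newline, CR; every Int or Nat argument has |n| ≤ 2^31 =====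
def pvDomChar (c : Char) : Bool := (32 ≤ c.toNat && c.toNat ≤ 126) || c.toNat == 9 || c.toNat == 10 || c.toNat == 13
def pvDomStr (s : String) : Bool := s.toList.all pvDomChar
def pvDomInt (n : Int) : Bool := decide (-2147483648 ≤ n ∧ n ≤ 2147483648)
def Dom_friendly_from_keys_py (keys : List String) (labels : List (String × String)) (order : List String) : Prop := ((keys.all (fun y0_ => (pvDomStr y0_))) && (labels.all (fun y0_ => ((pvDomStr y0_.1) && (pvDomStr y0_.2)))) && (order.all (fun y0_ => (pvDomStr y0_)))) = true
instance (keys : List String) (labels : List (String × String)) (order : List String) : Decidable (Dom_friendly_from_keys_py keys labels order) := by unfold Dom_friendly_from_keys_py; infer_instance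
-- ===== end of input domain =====

-- B replaces A's two membership-scanning loops by an index table of first order positions,
-- a dedup of keys, and ONE stable sort by that index (objective: faster); same return value.

-- ===== PORT A =====
-- literal transliteration: early return on empty keys, then the two loops
-- threading the state (seen : set, friendly : list)
def friendly_from_keys_py (keys : List String) (labels : List (String × String)) (order : List String) : List String :=
  if keys = [] then []
  else
    let st1 : PySem.Set String × List String :=
      order.foldl (fun st key =>
        if keys.contains key && !(PySem.Set.contains st.1 key) then
          (PySem.Set.add st.1 key, st.2 ++ [PySem.Dict.getD (PySem.Dict.mk labels) key key])
        else st) (PySem.Set.empty, [])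
    let st2 : PySem.Set String × List String :=
      keys.foldl (fun st key =>
        if !(PySem.Set.contains st.1 key) then
          (PySem.Set.add st.1 key, st.2 ++ [PySem.Dict.getD (PySem.Dict.mk labels) key key])
        else st) st1
    st2.2

-- ===== PORT B =====
-- transliteration of Source B: pos = first order index of each key (setdefault),
-- distinct = dict.fromkeys(keys), stable sort by pos.get(k, len(order)), then map labels
def friendly_from_keys_py_alt (keys : List String) (labels : List (String × String)) (order : List String) : List String :=
  let pos : PySem.Dict String Int :=
    (PySem.List.enumerate order 0).foldl (fun d ik => d.setdefault ik.2 ik.1) PySem.Dict.empty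
  let n : Int := order.length
  let distinct := PySem.List.dedup keys
  let sorted := PySem.List.sorted distinct (fun k => pos.getD k n)
  sorted.map (fun k => PySem.Dict.getD (PySem.Dict.mk labels) k k)

-- ===== PRECONDITION & SPEC =====
def Spec_friendly_from_keys_py (keys : List String) (labels : List (String × String)) (order : List String) (out : List String) : Prop := out = friendly_from_keys_py_alt keys labels order
instance (keys : List String) (labels : List (String × String)) (order : List String) (out : List String) : Decidable (Spec_friendly_from_keys_py keys labels order out) := by unfold Spec_friendly_from_keys_py; infer_instance

-- ===== CLAIM (what is proved, stated in full; the proofs are below) =====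
def Claim_equal_friendly_from_keys_py : Prop := ∀ (keys : List String) (labels : List (String × String)) (order : List String), Dom_friendly_from_keys_py keys labels order → Spec_friendly_from_keys_py keys labels order (friendly_from_keys_py keys labels order)

-- ===== LEMMAS AND PROOFS =====

-- the new elements A's loop body appends, given predicate p and already-seen list s
def news (p : String → Bool) : List String → List String → List String
  | _, [] => []
  | s, x :: xs => if p x && !(s.contains x) then x :: news p (s ++ [x]) xs else news p s xs

lemma news_congr (p q : String → Bool) (xs : List String) (s t : List String)
    (h : ∀ x ∈ xs, (p x && !(s.contains x)) = (q x && !(t.contains x))) :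
    news p s xs = news q t xs := by
  induction xs generalizing s t with
  | nil => rfl
  | cons x xs ih =>
    have hx := h x (List.mem_cons_self ..)
    by_cases hc : (p x && !(s.contains x)) = true
    · have hc' : (q x && !(t.contains x)) = true := hx ▸ hc
      simp only [news, if_pos hc, if_pos hc']
      refine congrArg (x :: ·) (ih _ _ (fun y hy => ?_))
      have hy' := h y (List.mem_cons_of_mem _ hy)
      by_cases hyx : y = x
      · subst hyx; simp [List.contains_eq_mem]
      · simpa only [List.contains_eq_mem, List.mem_append, List.mem_singleton, hyx,
          or_false, decide_eq_true_eq] using hy'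
    · have hc' : ¬ (q x && !(t.contains x)) = true := hx ▸ hc
      simp only [news, if_neg hc, if_neg hc']
      exact ih _ _ (fun y hy => h y (List.mem_cons_of_mem _ hy))

lemma mem_news (p : String → Bool) (xs : List String) :
    ∀ (s : List String) (y : String), y ∈ news p s xs ↔ y ∈ xs ∧ p y = true ∧ y ∉ s := by
  induction xs with
  | nil => simp [news]
  | cons x xs ih =>
    intro s y
    by_cases hc : (p x && !(s.contains x)) = true
    · simp only [news, if_pos hc, List.mem_cons, ih]
      simp only [Bool.and_eq_true, Bool.not_eq_true', List.contains_eq_mem, decide_eq_false_iff_not] at hc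
      constructor
      · rintro (rfl | ⟨hm, hp, hns⟩)
        · exact ⟨Or.inl rfl, hc.1, hc.2⟩
        · simp only [List.mem_append, List.mem_singleton] at hns
          exact ⟨Or.inr hm, hp, fun h => hns (Or.inl h)⟩
      · rintro ⟨(rfl | hm), hp, hns⟩
        · exact Or.inl rfl
        · by_cases hyx : y = x
          · exact Or.inl hyx
          · exact Or.inr ⟨hm, hp, by simp [hyx, hns]⟩
    · simp only [news, if_neg hc, ih, List.mem_cons]
      simp only [Bool.and_eq_true, Bool.not_eq_true', List.contains_eq_mem, not_and,
        Bool.not_eq_false, decide_eq_true_iff] at hc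
      constructor
      · rintro ⟨hm, hp, hns⟩; exact ⟨Or.inr hm, hp, hns⟩
      · rintro ⟨(rfl | hm), hp, hns⟩
        · exact absurd (hc hp) hns
        · exact ⟨hm, hp, hns⟩

lemma news_nodup (p : String → Bool) (xs : List String) :
    ∀ s, (news p s xs).Nodup := by
  induction xs with
  | nil => intro s; simp [news]
  | cons x xs ih =>
    intro s
    by_cases hc : (p x && !(s.contains x)) = true
    · simp only [news, if_pos hc, List.nodup_cons]
      refine ⟨fun hmem => ?_, ih _⟩
      have := ((mem_news p xs _ x).mp hmem).2.2
      simp at this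
    · simpa only [news, if_neg hc] using ih s

-- A's loop body, as a named step function
def stepA (labels : List (String × String)) (p : String → Bool)
    (st : PySem.Set String × List String) (key : String) : PySem.Set String × List String :=
  if p key && !(PySem.Set.contains st.1 key) then
    (PySem.Set.add st.1 key, st.2 ++ [PySem.Dict.getD (PySem.Dict.mk labels) key key])
  else st

lemma foldl_stepA (labels : List (String × String)) (p : String → Bool) (xs : List String) :
    ∀ (s f : List String),
      xs.foldl (stepA labels p) (s, f)
        = (s ++ news p s xs, f ++ (news p s xs).map (fun k => PySem.Dict.getD (PySem.Dict.mk labels) k k)) := by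
  induction xs with
  | nil => simp [news]
  | cons x xs ih =>
    intro s f
    by_cases hc : (p x && !(List.contains s x)) = true
    · have hns : s.contains x = false := by
        rcases Bool.and_eq_true .. |>.mp hc with ⟨_, h2⟩
        simpa using h2
      have hnm : x ∉ s := by simpa [List.contains_eq_mem] using hns
      have hp : p x = true := (Bool.and_eq_true .. |>.mp hc).1
      simp only [List.foldl_cons, stepA, PySem.Set.contains, PySem.Set.add,
        List.contains_eq_mem, hnm, decide_false, Bool.false_eq_true, if_neg, news, ih]
      simp [news, hc, hp]
    · simp only [List.foldl_cons, stepA, PySem.Set.contains, hc, if_neg, news, ih]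
      simp [news, hc]

lemma dedup_eq_news (xs : List String) : ∀ s : List String,
    xs.foldl PySem.Set.add s = s ++ news (fun _ => true) s xs := by
  induction xs with
  | nil => simp [news]
  | cons x xs ih =>
    intro s
    by_cases hs : s.contains x = true
    · have hm : x ∈ s := by simpa [List.contains_eq_mem] using hs
      simp [PySem.Set.add, PySem.Set.contains, hs, hm, news, ih]
    · have hm : x ∉ s := by simpa [List.contains_eq_mem] using hs
      simp only [List.foldl_cons, PySem.Set.add, PySem.Set.contains, List.contains_eq_mem,
        hm, decide_false, Bool.false_eq_true, if_neg, news, ih]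
      simp [List.contains_eq_mem, hm]

lemma pydedup_eq_news (xs : List String) :
    PySem.List.dedup xs = news (fun _ => true) [] xs := by
  have := dedup_eq_news xs []
  simpa [PySem.List.dedup_eq_ofList, PySem.Set.ofList_eq_foldl] using this

-- splitting news over an append (p = true: seen grows by exactly the output)
lemma news_true_append (xs ys : List String) : ∀ s,
    news (fun _ => true) s (xs ++ ys)
      = news (fun _ => true) s xs ++ news (fun _ => true) (s ++ news (fun _ => true) s xs) ys := by
  induction xs with
  | nil => intro s; simp [news]
  | cons x xs ih =>
    intro s
    by_cases hs : x ∈ s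
    · simp [news, List.contains_eq_mem, hs, ih]
    · simp [news, List.contains_eq_mem, hs, ih, List.append_assoc]

-- an element the predicate rejects may be dropped from the seen list
lemma news_seen_extra (p : String → Bool) (x : String) (hp : p x = false) (xs : List String) :
    ∀ s, (news (fun _ => true) (s ++ [x]) xs).filter p = (news (fun _ => true) s xs).filter p := by
  induction xs with
  | nil => intro s; simp [news]
  | cons y xs ih =>
    intro s
    by_cases hyx : y = x
    · subst hyx
      by_cases hs : y ∈ s
      · simp [news, List.contains_eq_mem, hs, ih]
      · simp [news, List.contains_eq_mem, hs, List.filter_cons, hp]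
    · by_cases hs : y ∈ s
      · simp [news, List.contains_eq_mem, hs, hyx, ih]
      · have hrw : news (fun _ => true) (s ++ [x] ++ [y]) xs
            = news (fun _ => true) (s ++ [y] ++ [x]) xs := by
          refine news_congr _ _ _ _ _ (fun z hz => ?_)
          simp only [List.contains_eq_mem, List.mem_append, List.mem_singleton]
          by_cases h1 : z ∈ s <;> by_cases h2 : z = x <;> by_cases h3 : z = y <;> simp [h1, h2, h3]
        simp only [news, List.contains_eq_mem, List.mem_append, List.mem_singleton, hs, hyx,
          or_false, decide_false, Bool.not_false, Bool.true_and, if_pos, List.filter_cons, hrw, ih]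
  termination_by xs => xs.length

-- news with predicate p is news with predicate true, filtered by p
lemma news_eq_filter (p : String → Bool) (xs : List String) :
    ∀ s, news p s xs = (news (fun _ => true) s xs).filter p := by
  induction xs with
  | nil => intro s; simp [news]
  | cons x xs ih =>
    intro s
    by_cases hs : x ∈ s
    · simp [news, List.contains_eq_mem, hs, ih]
    · by_cases hp : p x = true
      · simp [news, List.contains_eq_mem, hs, hp, List.filter_cons, ih]
      · have hp' : p x = false := by simpa using hp
        simp only [news, List.contains_eq_mem, hs, decide_false, Bool.not_false, Bool.and_true,
          hp', Bool.false_eq_true, if_neg, if_pos, Bool.true_and, not_false_eq_true,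
          decide_true, List.filter_cons]
        rw [ih, news_seen_extra p x hp' xs s]
  termination_by xs => xs.length

-- news over a seen list t ++ s is news over t, with the s-members filtered away
lemma news_seen_filter (s xs : List String) :
    ∀ t, news (fun _ => true) (t ++ s) xs
      = (news (fun _ => true) t xs).filter (fun x => !(s.contains x)) := by
  induction xs with
  | nil => intro t; simp [news]
  | cons x xs ih =>
    intro t
    by_cases ht : x ∈ t
    · simp [news, List.contains_eq_mem, ht, ih]
    · by_cases hs : x ∈ s
      · have hrw : news (fun _ => true) (t ++ s) xs
            = news (fun _ => true) (t ++ [x] ++ s) xs := by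
          refine news_congr _ _ _ _ _ (fun z hz => ?_)
          simp only [List.contains_eq_mem, List.mem_append, List.mem_singleton]
          by_cases h1 : z ∈ t <;> by_cases h2 : z = x <;> by_cases h3 : z ∈ s <;>
            simp [h1, h2, h3] <;> (try subst h2) <;> simp_all
        simp only [news, List.contains_eq_mem, List.mem_append, ht, hs, or_true, decide_true,
          Bool.not_true, Bool.true_and, Bool.false_eq_true, if_neg, or_false, decide_false,
          Bool.not_false, if_pos, List.filter_cons]
        rw [hrw, ih (t ++ [x])]
        simp [List.contains_eq_mem, hs]
      · have hrw : news (fun _ => true) (t ++ s ++ [x]) xs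
            = news (fun _ => true) (t ++ [x] ++ s) xs := by
          refine news_congr _ _ _ _ _ (fun z hz => ?_)
          simp only [List.contains_eq_mem, List.mem_append, List.mem_singleton]
          by_cases h1 : z ∈ t <;> by_cases h2 : z = x <;> by_cases h3 : z ∈ s <;> simp [h1, h2, h3]
        simp only [news, List.contains_eq_mem, List.mem_append, List.mem_singleton, ht, hs,
          or_false, decide_false, Bool.not_false, Bool.true_and, if_pos, List.filter_cons,
          Bool.not_eq_eq_eq_not]
        rw [hrw, ih (t ++ [x])]
        simp [List.contains_eq_mem, hs]
  termination_by xs => xs.length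

-- first index of k in order, with default order.length (= pos.get(k, n) in B)
def idxI (order : List String) (k : String) : Int :=
  match PySem.List.index? order k with
  | some i => (i : Int)
  | none => (order.length : Int)

lemma index?_none_of_not_mem (order : List String) (k : String) (h : k ∉ order) :
    PySem.List.index? order k = none := by
  cases hi : PySem.List.index? order k with
  | none => rfl
  | some i =>
    obtain ⟨pre, suf, heq, -, -⟩ := (PySem.List.index?_eq_some_iff order k i).mp hi
    exact absurd (heq ▸ List.mem_append_right pre (List.mem_cons_self ..)) h

lemma index?_some_of_mem (order : List String) (k : String) (h : k ∈ order) :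
    ∃ i, PySem.List.index? order k = some i ∧ i < order.length := by
  induction order with
  | nil => simp at h
  | cons o os ih =>
    by_cases ho : o = k
    · subst ho; exact ⟨0, PySem.List.index?_cons_self o os, by simp⟩
    · have hm : k ∈ os := by
        rcases List.mem_cons.mp h with h' | h'
        · exact absurd h'.symm ho
        · exact h'
      obtain ⟨i, hi, hlt⟩ := ih hm
      exact ⟨i + 1, by rw [PySem.List.index?_cons_of_ne os ho, hi]; rfl, by simpa using Nat.succ_lt_succ hlt⟩

lemma idxI_lt_of_mem (order : List String) (k : String) (h : k ∈ order) :
    idxI order k < (order.length : Int) := by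
  obtain ⟨i, hi, hlt⟩ := index?_some_of_mem order k h
  simp only [idxI, hi]
  exact_mod_cast hlt

lemma idxI_of_not_mem (order : List String) (k : String) (h : k ∉ order) :
    idxI order k = (order.length : Int) := by
  unfold idxI
  rw [index?_none_of_not_mem order k h]

lemma idxI_le (order : List String) (k : String) : idxI order k ≤ (order.length : Int) := by
  by_cases h : k ∈ order
  · exact le_of_lt (idxI_lt_of_mem order k h)
  · exact le_of_eq (idxI_of_not_mem order k h)

-- the pos dict of B computes idxI
lemma posfold_getD (N : Int) (os : List String) :
    ∀ (s : Int) (d : PySem.Dict String Int) (k : String),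
      (((PySem.List.enumerate os s).foldl (fun d ik => d.setdefault ik.2 ik.1) d).getD k N)
        = if d.contains k then d.getD k N
          else (match PySem.List.index? os k with
                | some i => s + (i : Int)
                | none => N) := by
  induction os with
  | nil =>
    intro s d k
    simp only [PySem.List.enumerate, List.foldl_nil]
    by_cases hdk : d.contains k = true
    · rw [if_pos hdk]
    · rw [if_neg hdk, PySem.Dict.getD_of_not_contains d N (by simpa using hdk),
        index?_none_of_not_mem [] k (by simp)]
  | cons o os ih =>
    intro s d k
    rw [PySem.List.enumerate_cons, List.foldl_cons, ih]
    by_cases hdk : d.contains k = true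
    · have h1 : (d.setdefault o s).contains k = true := by
        rw [PySem.Dict.contains_setdefault]; simp [hdk]
      rw [if_pos h1, if_pos hdk]
      by_cases hko : k = o
      · subst hko; rw [PySem.Dict.setdefault_of_contains d s hdk]
      · simp [PySem.Dict.getD, PySem.Dict.get?_setdefault_of_ne d s hko]
    · by_cases hko : k = o
      · subst hko
        have h1 : (d.setdefault k s).contains k = true := by
          rw [PySem.Dict.contains_setdefault]; simp
        rw [if_pos h1, if_neg (by simp [hdk]), PySem.List.index?_cons_self]
        rw [PySem.Dict.getD_setdefault_self,
          PySem.Dict.getD_of_not_contains d s (by simpa using hdk)]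
        simp
      · have h1 : (d.setdefault o s).contains k = (d.contains k) := by
          rw [PySem.Dict.contains_setdefault]
          simp [hko]
        rw [h1, if_neg (by simp [hdk]), if_neg (by simp [hdk])]
        rw [PySem.List.index?_cons_of_ne os (fun h => hko h.symm)]
        cases hi : PySem.List.index? os k <;> simp [Option.map] <;> push_cast <;> ring

-- the distinct first occurrences of order have strictly increasing first index
lemma idxI_append_of_mem (os : List String) (o a : String) (ha : a ∈ os) :
    idxI (os ++ [o]) a = idxI os a := by
  obtain ⟨i, hi, -⟩ := index?_some_of_mem os a ha
  unfold idxI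
  rw [PySem.List.index?_append_of_mem [o] ha, hi]

lemma dedup_order_pairwise (order : List String) :
    (news (fun _ => true) [] order).Pairwise (fun a b => idxI order a < idxI order b) := by
  induction order using List.reverseRecOn with
  | nil => simp [news]
  | append_singleton os o ih =>
    rw [news_true_append os [o] []]
    have hmemD : ∀ a ∈ news (fun _ => true) ([] : List String) os, a ∈ os := by
      intro a ha; exact ((mem_news _ os [] a).mp ha).1
    have hD : (news (fun _ => true) [] os).Pairwise
        (fun a b => idxI (os ++ [o]) a < idxI (os ++ [o]) b) := by
      refine ih.imp_of_mem (fun {a b} ha hb hab => ?_)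
      rw [idxI_append_of_mem os o a (hmemD a ha), idxI_append_of_mem os o b (hmemD b hb)]
      exact hab
    rw [List.pairwise_append]
    refine ⟨hD, ?_, ?_⟩
    · by_cases ho : o ∈ os <;>
        simp [news, List.contains_eq_mem, mem_news, ho]
    · intro a ha b hb
      by_cases ho : o ∈ os
      · simp [news, List.contains_eq_mem, mem_news, ho] at hb
      · have hsing : news (fun _ => true) ([] ++ news (fun _ => true) [] os) [o] = [o] := by
          have : o ∉ news (fun _ => true) ([] : List String) os :=
            fun hmem => ho (hmemD o hmem)
          simp [news, List.contains_eq_mem, this]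
        rw [hsing, List.mem_singleton] at hb
        have ha' := hmemD a ha
        have h1 : idxI (os ++ [o]) a < (os.length : Int) := by
          rw [idxI_append_of_mem os o a ha']
          exact_mod_cast idxI_lt_of_mem os a ha'
        have h2 : idxI (os ++ [o]) o = (os.length : Int) := by
          unfold idxI
          rw [PySem.List.index?_append_singleton_self os o ho]
        rw [hb]
        omega

-- insertBy distributes over an append whose right part x goes before entirely
lemma insertBy_append_before (b : String → String → Bool) (x : String) (A B : List String)
    (h : ∀ y ∈ B, b x y = true) :
    PySem.List.insertBy b x (A ++ B) = PySem.List.insertBy b x A ++ B := by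
  induction A with
  | nil =>
    cases B with
    | nil => rfl
    | cons y ys => simp [PySem.List.insertBy, h y (List.mem_cons_self ..)]
  | cons a A ih =>
    by_cases hba : b x a = true
    · simp [PySem.List.insertBy, hba]
    · simp [PySem.List.insertBy, hba, ih]

-- stable sort with keys ≤ N splits: strictly-smaller part sorted, the N-part kept in order
lemma sorted_split (key : String → Int) (N : Int) (xs : List String)
    (h : ∀ x ∈ xs, key x ≤ N) :
    PySem.List.sorted xs key
      = PySem.List.sorted (xs.filter (fun x => decide (key x < N))) key
          ++ xs.filter (fun x => decide (key x = N)) := by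
  induction xs using List.reverseRecOn with
  | nil => simp [PySem.List.sorted_eq_foldl_insertBy]
  | append_singleton xs x ih =>
    have hxs : ∀ y ∈ xs, key y ≤ N := fun y hy => h y (List.mem_append_left _ hy)
    have hx : key x ≤ N := h x (List.mem_append_right _ (List.mem_cons_self ..))
    have hfold : PySem.List.sorted (xs ++ [x]) key
        = PySem.List.insertBy (fun a b => decide (key a < key b)) x (PySem.List.sorted xs key) := by
      rw [PySem.List.sorted_eq_foldl_insertBy, PySem.List.sorted_eq_foldl_insertBy,
        List.foldl_append]
      rfl
    rw [hfold, ih hxs, List.filter_append, List.filter_append]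
    by_cases hxe : key x = N
    · have hno : ∀ y ∈ PySem.List.sorted (xs.filter (fun x => decide (key x < N))) key
          ++ xs.filter (fun x => decide (key x = N)), decide (key x < key y) = false := by
        intro y hy
        rcases List.mem_append.mp hy with hy | hy
        · have := List.of_mem_filter ((PySem.List.mem_sorted _ key false y).mp hy)
          simp only [decide_eq_true_eq] at this
          simp [hxe]; omega
        · have := List.of_mem_filter hy
          simp only [decide_eq_true_eq] at this
          simp [hxe, this]
      rw [PySem.List.insertBy_of_forall_not_before _ _ _ hno]
      simp [hxe, List.append_assoc]
    · have hxlt : key x < N := lt_of_le_of_ne hx hxe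
      have hB : ∀ y ∈ xs.filter (fun x => decide (key x = N)), decide (key x < key y) = true := by
        intro y hy
        have := List.of_mem_filter hy
        simp only [decide_eq_true_eq] at this
        simp [this, hxlt]
      rw [insertBy_append_before _ _ _ _ hB]
      have hsx : PySem.List.insertBy (fun a b => decide (key a < key b)) x
          (PySem.List.sorted (xs.filter (fun x => decide (key x < N))) key)
          = PySem.List.sorted (xs.filter (fun x => decide (key x < N)) ++ [x]) key := by
        rw [PySem.List.sorted_eq_foldl_insertBy (xs.filter (fun x => decide (key x < N)) ++ [x]) key,
          List.foldl_append, ← PySem.List.sorted_eq_foldl_insertBy]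
        rfl
      rw [hsx]
      simp [List.filter_singleton, hxlt, hxe]

-- ===== VERDICT (by name: the statement is the Claim_ definition above) =====
theorem friendly_from_keys_py_spec : Claim_equal_friendly_from_keys_py := by
  intro keys labels order _
  show friendly_from_keys_py keys labels order = friendly_from_keys_py_alt keys labels order
  by_cases hk : keys = []
  · subst hk
    simp [friendly_from_keys_py, friendly_from_keys_py_alt, PySem.List.dedup_eq_ofList,
      PySem.Set.ofList, PySem.List.sorted]
  · -- names for the pieces
    set N : Int := (order.length : Int) with hN
    set O : List String := news (fun k => keys.contains k) [] order with hO
    set R : List String := news (fun _ => true) O keys with hR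
    -- A computes map f (O ++ R)
    have hA : friendly_from_keys_py keys labels order
        = (O ++ R).map (fun k => PySem.Dict.getD (PySem.Dict.mk labels) k k) := by
      unfold friendly_from_keys_py
      rw [if_neg hk]
      show (keys.foldl (stepA labels (fun _ => true))
        (order.foldl (stepA labels (fun k => keys.contains k)) (PySem.Set.empty, []))).2 = _
      rw [foldl_stepA]
      simp only [PySem.Set.empty, List.nil_append, ← hO]
      rw [foldl_stepA]
      simp only [List.nil_append, List.map_append]
      rfl
    -- B's key function is idxI order
    have hkey : (fun k => ((PySem.List.enumerate order 0).foldl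
          (fun d ik => d.setdefault ik.2 ik.1) PySem.Dict.empty).getD k N)
        = idxI order := by
      funext k
      rw [posfold_getD N order 0 PySem.Dict.empty k]
      rw [if_neg (by simp [PySem.Dict.contains_empty])]
      unfold idxI
      cases PySem.List.index? order k <;> simp [hN]
    -- the strictly-below-N part sorts to O
    have hOsorted : PySem.List.sorted
        ((PySem.List.dedup keys).filter (fun x => decide (idxI order x < N))) (idxI order) = O := by
      apply PySem.List.sorted_eq_of_perm_of_pairwise_lt
      · rw [List.perm_ext_iff_of_nodup (hO ▸ news_nodup _ order [])
          ((PySem.List.nodup_dedup keys).filter _)]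
        intro a
        rw [hO, mem_news, List.mem_filter, PySem.List.mem_dedup]
        constructor
        · rintro ⟨hao, hak, -⟩
          have hak' : a ∈ keys := by simpa [List.contains_eq_mem] using hak
          exact ⟨hak', by simpa using idxI_lt_of_mem order a hao⟩
        · rintro ⟨hak, halt⟩
          refine ⟨?_, by simpa [List.contains_eq_mem] using hak, by simp⟩
          by_contra hao
          rw [idxI_of_not_mem order a hao, hN] at halt
          simp at halt
      · rw [hO, news_eq_filter]
        exact (dedup_order_pairwise order).filter _
    -- the N-part of the dedup is R
    have hRfilt : (PySem.List.dedup keys).filter (fun x => decide (idxI order x = N)) = R := by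
      have h1 : R = (news (fun _ => true) ([] : List String) keys).filter
          (fun x => !(O.contains x)) := by
        rw [hR]
        have h2 := news_seen_filter O keys []
        rw [List.nil_append] at h2
        exact h2
      rw [h1, ← pydedup_eq_news]
      refine (List.filter_congr (fun x hx => ?_)).symm
      have hxk : x ∈ keys := (PySem.List.mem_dedup keys x).mp hx
      by_cases hxo : x ∈ order
      · have hxO : x ∈ O := by
          rw [hO, mem_news]
          exact ⟨hxo, by simpa [List.contains_eq_mem] using hxk, by simp⟩
        have hlt := idxI_lt_of_mem order x hxo
        simp [List.contains_eq_mem, hxO]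
        omega
      · have hxO : x ∉ O := by
          rw [hO, mem_news]; rintro ⟨h1, -, -⟩; exact hxo h1
        simp [List.contains_eq_mem, hxO, idxI_of_not_mem order x hxo, hN]
    -- assemble
    rw [hA]
    show _ = (PySem.List.sorted (PySem.List.dedup keys)
        (fun k => ((PySem.List.enumerate order 0).foldl
          (fun d ik => d.setdefault ik.2 ik.1) PySem.Dict.empty).getD k ((order.length : Int)))).map
        (fun k => PySem.Dict.getD (PySem.Dict.mk labels) k k)
    rw [← hN, hkey, sorted_split (idxI order) N (PySem.List.dedup keys)
      (fun x _ => hN ▸ idxI_le order x), hOsorted, hRfilt]
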